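-- pv_equiv track=rewrite | github.com/aviswerdlow/k4 | 07_TOOLS/L17/run_l17_map_unknowns.py | aggregate_by_slot
-- ===== SOURCE A (Python) =====
-- from collections import defaultdict
--
-- def aggregate_by_slot(unknown_map):
--     """Aggregate unknowns by slot per class"""
--     by_slot = defaultdict(lambda: defaultdict(int))
--     for item in unknown_map:
--         by_slot[item['class']][item['slot']] += 1
--
--     # Convert to regular dict
--     result = {}
--     for c in range(6):
--         result[c] = dict(by_slot[c])
--     return result
-- ===== SOURCE B (Python) =====
-- def aggregate_by_slot(unknown_map):
--     """Aggregate unknowns by slot per class"""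
--     result = {}
--     for c in range(6):
--         slots = [item['slot'] for item in unknown_map if item['class'] == c]
--         result[c] = {s: slots.count(s) for s in dict.fromkeys(slots)}
--     return result
-- ===== Notes on version B (the rewrite author's own statement) =====
-- stated objective: alternative
-- what changed: Removes the counting accumulator entirely: instead of one pass incrementing nested dicts, B makes a staged pass per class c in range(6), filtering that class's slots and building each inner dict by dict.fromkeys order with list.count per distinct slot.
import Mathlib
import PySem

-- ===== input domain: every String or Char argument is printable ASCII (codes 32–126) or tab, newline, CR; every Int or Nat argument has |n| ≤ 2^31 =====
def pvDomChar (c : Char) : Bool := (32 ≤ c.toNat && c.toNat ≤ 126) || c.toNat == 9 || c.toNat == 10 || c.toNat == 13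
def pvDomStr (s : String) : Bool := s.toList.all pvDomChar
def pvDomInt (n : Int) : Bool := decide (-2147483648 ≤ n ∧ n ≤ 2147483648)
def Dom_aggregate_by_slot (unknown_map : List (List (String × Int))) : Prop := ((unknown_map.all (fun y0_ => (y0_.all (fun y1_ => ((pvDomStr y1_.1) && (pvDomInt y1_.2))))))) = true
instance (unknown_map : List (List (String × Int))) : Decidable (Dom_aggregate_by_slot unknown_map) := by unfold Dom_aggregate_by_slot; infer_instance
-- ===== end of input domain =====

-- B drops A's counting accumulator: per class c in range(6) it filters that class's slots and builds
-- the inner dict via dict.fromkeys order with list.count per distinct slot; objective: alternative.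


-- ===== PORT A =====
-- A: by_slot = defaultdict(lambda: defaultdict(int)); for item: by_slot[item['class']][item['slot']] += 1;
-- then result[c] = dict(by_slot[c]) for c in range(6).  item['class'] is ported as getD (Pre_ excludes the KeyError inputs).
def aggregate_by_slot (unknown_map : List (List (String × Int))) : List (Int × List (Int × Int)) :=
  let by_slot : PySem.Dict Int (PySem.Dict Int Int) :=
    unknown_map.foldl (fun d item =>
      d.modify ((PySem.Dict.mk item).getD "class" 0) PySem.Dict.empty
        (fun inner => inner.modify ((PySem.Dict.mk item).getD "slot" 0) 0 (· + 1))) PySem.Dict.empty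
  (PySem.List.pyRange 0 6 1).foldl
    (fun res c => res ++ [(c, (by_slot.getD c PySem.Dict.empty).items)]) []

-- ===== PORT B =====
-- B: for c in range(6): slots = [item['slot'] for item in unknown_map if item['class'] == c];
--    result[c] = {s: slots.count(s) for s in dict.fromkeys(slots)}
def aggregate_by_slot_alt (unknown_map : List (List (String × Int))) : List (Int × List (Int × Int)) :=
  (PySem.List.pyRange 0 6 1).foldl
    (fun res c =>
      let slots := (unknown_map.filter (fun item => (PySem.Dict.mk item).getD "class" 0 == c)).map
        (fun item => (PySem.Dict.mk item).getD "slot" 0)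
      res ++ [(c, (PySem.List.dedup slots).map (fun s => (s, (slots.count s : Int))))]) []

-- ===== PRECONDITION & SPEC =====
-- Pre_ excludes exactly the inputs where the Python A raises KeyError: an item missing the 'class' or 'slot' key.
def Pre_aggregate_by_slot (unknown_map : List (List (String × Int))) : Prop :=
  (unknown_map.all (fun item =>
    (PySem.Dict.mk item).contains "class" && (PySem.Dict.mk item).contains "slot")) = true
instance (unknown_map : List (List (String × Int))) : Decidable (Pre_aggregate_by_slot unknown_map) := by unfold Pre_aggregate_by_slot; infer_instance
def pvWitness_aggregate_by_slot : (List (List (String × Int))) := [[("class", 0), ("slot", 1)], [("class", 5), ("slot", 1)]]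

def Spec_aggregate_by_slot (unknown_map : List (List (String × Int))) (out : List (Int × List (Int × Int))) : Prop := out = aggregate_by_slot_alt unknown_map
instance (unknown_map : List (List (String × Int))) (out : List (Int × List (Int × Int))) : Decidable (Spec_aggregate_by_slot unknown_map out) := by unfold Spec_aggregate_by_slot; infer_instance

-- ===== CLAIM (what is proved, stated in full; the proofs are below) =====
def Claim_equal_aggregate_by_slot : Prop := ∀ (unknown_map : List (List (String × Int))), Dom_aggregate_by_slot unknown_map → Pre_aggregate_by_slot unknown_map → Spec_aggregate_by_slot unknown_map (aggregate_by_slot unknown_map)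

-- ===== LEMMAS AND PROOFS =====

-- A's outer fold, read at class c, is the inner counting fold over the slots of class c
theorem pv_foldA_getD (pairs : List (Int × Int)) (d : PySem.Dict Int (PySem.Dict Int Int)) (c : Int) :
    ((pairs.foldl (fun d p => d.modify p.1 PySem.Dict.empty
        (fun inner => inner.modify p.2 0 (· + 1))) d).getD c PySem.Dict.empty)
      = ((pairs.filter (fun p => p.1 == c)).map (·.2)).foldl
          (fun inner s => inner.modify s 0 (· + 1)) (d.getD c PySem.Dict.empty) := by
  induction pairs generalizing d with
  | nil => rfl
  | cons p rest ih =>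
    simp only [List.foldl_cons, List.filter_cons]
    by_cases hc : p.1 = c
    · simp [hc, ih]
    · have hc' : c ≠ p.1 := fun h => hc h.symm
      rw [ih, PySem.Dict.getD_modify_of_ne _ _ _ hc']
      simp [hc]

-- ===== VERDICT (by name: the statement is the Claim_ definition above) =====
theorem aggregate_by_slot_spec : Claim_equal_aggregate_by_slot := by
  intro unknown_map _ _
  unfold Spec_aggregate_by_slot aggregate_by_slot aggregate_by_slot_alt
  rw [PySem.List.foldl_append_singleton_eq_map, PySem.List.foldl_append_singleton_eq_map]
  simp only [List.nil_append]
  apply List.map_congr_left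
  intro c _
  -- push A's per-item fold to a fold over (class, slot) pairs
  have hm : unknown_map.foldl (fun (d : PySem.Dict Int (PySem.Dict Int Int)) item =>
        d.modify ((PySem.Dict.mk item).getD "class" 0) PySem.Dict.empty
          (fun inner => inner.modify ((PySem.Dict.mk item).getD "slot" 0) 0 (· + 1))) PySem.Dict.empty
      = (unknown_map.map (fun item : List (String × Int) =>
            ((PySem.Dict.mk item).getD "class" 0, (PySem.Dict.mk item).getD "slot" 0))).foldl
          (fun d p => d.modify p.1 PySem.Dict.empty
            (fun inner => inner.modify p.2 0 (· + 1))) PySem.Dict.empty := by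
    rw [List.foldl_map]
  rw [hm, pv_foldA_getD, PySem.Dict.getD_empty]
  -- the remaining fold from empty is Counter(slots); its items are B's dedup/count list
  rw [← PySem.Dict.counter_eq_foldl, PySem.Dict.items_counter]
  simp [PySem.List.dedup_eq_ofList, List.filter_map, List.map_map, Function.comp_def]
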